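-- pv_equiv track=rewrite | github.com/SLajuwomi/pycpbook | stress_tests/string/z_algorithm.py | naive_z_function
-- ===== SOURCE A (Python) =====
-- def naive_z_function(s):
--     """
--     A naive O(N^2) implementation of the Z-algorithm for validation.
--     """
--     n = len(s)
--     if n == 0:
--         return []
--     z = [0] * n
--     for i in range(1, n):
--         while i + z[i] < n and s[z[i]] == s[i + z[i]]:
--             z[i] += 1
--     return z
-- ===== SOURCE B (Python) =====
-- def naive_z_function(s):
--     """Linear-time Z-algorithm maintaining the rightmost match window [l, r)."""
--     n = len(s)
--     if n == 0:
--         return []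
--     z = [0] * n
--     l = r = 0
--     for i in range(1, n):
--         if i < r:
--             z[i] = min(r - i, z[i - l])
--         while i + z[i] < n and s[z[i]] == s[i + z[i]]:
--             z[i] += 1
--         if i + z[i] > r:
--             l, r = i, i + z[i]
--     return z
-- ===== Notes on version B (the rewrite author's own statement) =====
-- stated objective: faster
-- what changed: Replaced A's per-index from-scratch rescans by the standard linear Z-algorithm that maintains the rightmost match window [l, r) and initializes each z[i] from min(r-i, z[i-l]) before extending.
import Mathlib
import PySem

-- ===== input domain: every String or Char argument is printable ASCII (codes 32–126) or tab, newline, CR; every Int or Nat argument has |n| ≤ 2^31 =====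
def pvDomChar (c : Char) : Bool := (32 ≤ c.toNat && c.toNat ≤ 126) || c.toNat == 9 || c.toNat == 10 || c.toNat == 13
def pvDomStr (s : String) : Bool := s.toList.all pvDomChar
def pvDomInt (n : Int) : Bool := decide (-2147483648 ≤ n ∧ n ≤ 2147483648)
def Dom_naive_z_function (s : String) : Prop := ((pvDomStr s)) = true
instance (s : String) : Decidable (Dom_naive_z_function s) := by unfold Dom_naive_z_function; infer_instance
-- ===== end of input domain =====

-- B replaces A's per-index rescans by the linear Z-algorithm maintaining the rightmost match window [l, r).

-- ===== PORT A =====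
-- the inner `while i + z[i] < n and s[z[i]] == s[i + z[i]]: z[i] += 1` of A, started at z
def pvCountA (t : List Char) (i : Nat) (z : Nat) : Nat :=
  if h : i + z < t.length ∧ t[z]? = t[i + z]? then pvCountA t i (z + 1) else z
termination_by t.length - (i + z)
decreasing_by omega

def naive_z_function (s : String) : List Int :=
  let t := s.toList
  let n := t.length
  if n = 0 then []
  else (0 : Int) :: (List.range' 1 (n - 1)).map (fun i => (pvCountA t i 0 : Int))

-- ===== PORT B =====
-- the identical inner while loop of B (B shares A's extension loop, started at the window value)
def pvCountB (t : List Char) (i : Nat) (z : Nat) : Nat :=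
  if h : i + z < t.length ∧ t[z]? = t[i + z]? then pvCountB t i (z + 1) else z
termination_by t.length - (i + z)
decreasing_by omega

-- one iteration of B's `for i in range(1, n)` body; state = (z-values so far, l, r)
def pvStepB (t : List Char) (st : List Nat × Nat × Nat) (i : Nat) : List Nat × Nat × Nat :=
  let acc := st.1
  let l := st.2.1
  let r := st.2.2
  let z0 := if i < r then min (r - i) (acc.getD (i - l) 0) else 0
  let zi := pvCountB t i z0
  if r < i + zi then (acc ++ [zi], i, i + zi) else (acc ++ [zi], l, r)

def naive_z_function_alt (s : String) : List Int :=
  let t := s.toList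
  let n := t.length
  if n = 0 then []
  else ((List.range' 1 (n - 1)).foldl (pvStepB t) ([0], 0, 0)).1.map Int.ofNat

-- ===== PRECONDITION & SPEC =====
def Spec_naive_z_function (s : String) (out : List Int) : Prop := out = naive_z_function_alt s
instance (s : String) (out : List Int) : Decidable (Spec_naive_z_function s out) := by unfold Spec_naive_z_function; infer_instance

-- ===== CLAIM (what is proved, stated in full; the proofs are below) =====
def Claim_equal_naive_z_function : Prop := ∀ (s : String), Dom_naive_z_function s → Spec_naive_z_function s (naive_z_function s)

-- ===== LEMMAS AND PROOFS =====

-- longest common prefix length of two character lists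
def pvLcp : List Char → List Char → Nat
  | a :: as, b :: bs => if a = b then pvLcp as bs + 1 else 0
  | _, _ => 0

-- the true Z-value at index i
def pvZ (t : List Char) (i : Nat) : Nat := pvLcp t (t.drop i)

theorem pvLcp_le_right (a b : List Char) : pvLcp a b ≤ b.length := by
  induction a generalizing b with
  | nil => simp [pvLcp]
  | cons x as ih =>
    cases b with
    | nil => simp [pvLcp]
    | cons y bs =>
      simp only [pvLcp, List.length_cons]
      split_ifs
      · have := ih bs; omega
      · omega

theorem pvLcp_match (a b : List Char) (m : Nat) (hm : m < pvLcp a b) :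
    a[m]? = b[m]? ∧ (a[m]?).isSome := by
  induction a generalizing b m with
  | nil => simp [pvLcp] at hm
  | cons x as ih =>
    cases b with
    | nil => simp [pvLcp] at hm
    | cons y bs =>
      simp only [pvLcp] at hm
      split_ifs at hm with hxy
      · cases m with
        | zero => subst hxy; simp
        | succ m' =>
          have := ih bs m' (by omega)
          simpa using this
      · omega

theorem pvLcp_ge (a b : List Char) (k : Nat)
    (h : ∀ m < k, a[m]? = b[m]? ∧ (a[m]?).isSome) : k ≤ pvLcp a b := by
  induction k generalizing a b with
  | zero => omega
  | succ k' ih =>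
    obtain ⟨h0, hs⟩ := h 0 (by omega)
    cases a with
    | nil => simp at hs
    | cons x as =>
      cases b with
      | nil => simp at h0
      | cons y bs =>
        simp at h0
        simp only [pvLcp, h0, if_pos]
        have : k' ≤ pvLcp as bs := by
          apply ih
          intro m hm
          have := h (m + 1) (by omega)
          simpa using this
        omega

-- the shared while loop computes pvZ from any start value ≤ pvZ
theorem pvCountA_eq (t : List Char) (i k : Nat) (hi : 1 ≤ i) (hk : k ≤ pvZ t i) :
    pvCountA t i k = pvZ t i := by
  rcases Nat.lt_or_ge k (pvZ t i) with hlt | hge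
  · have hm := pvLcp_match t (t.drop i) k hlt
    rw [List.getElem?_drop] at hm
    have hsome : (t[i + k]?).isSome := hm.1 ▸ hm.2
    have hik : i + k < t.length := by
      rcases Option.isSome_iff_exists.mp hsome with ⟨c, hc⟩
      exact (List.getElem?_eq_some_iff.mp hc).1
    rw [pvCountA, dif_pos ⟨hik, hm.1⟩]
    exact pvCountA_eq t i (k + 1) hi (by omega)
  · have hkz : k = pvZ t i := by omega
    rw [pvCountA, dif_neg]
    · exact hkz
    rintro ⟨h1, h2⟩
    have hge' : pvLcp t (t.drop i) ≤ k := hge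
    have hkz' : k = pvLcp t (t.drop i) := hkz
    have : k + 1 ≤ pvZ t i := by
      apply pvLcp_ge
      intro m hm
      rcases Nat.lt_or_ge m k with hmk | hmk
      · exact pvLcp_match t (t.drop i) m (by omega)
      · have hmk' : m = k := by omega
        subst hmk'
        rw [List.getElem?_drop]
        refine ⟨h2, ?_⟩
        rw [h2, List.getElem?_eq_getElem h1]
        simp
    have : k + 1 ≤ pvLcp t (t.drop i) := this
    omega
termination_by pvZ t i - k

theorem pvCountB_eq_pvCountA (t : List Char) (i k : Nat) : pvCountB t i k = pvCountA t i k := by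
  rw [pvCountB, pvCountA]
  split_ifs with h
  · exact pvCountB_eq_pvCountA t i (k + 1)
  · rfl
termination_by t.length - (i + k)
decreasing_by omega

-- the window lower bound: inside the window, the initial value min(r-i, z[i-l]) never overshoots
theorem pvWindow_lb (t : List Char) (l i r : Nat) (_hl : 1 ≤ l) (hli : l < i) (hir : i < r)
    (hr : r = l + pvZ t l) : min (r - i) (pvZ t (i - l)) ≤ pvZ t i := by
  apply pvLcp_ge
  intro m hm
  have hm1 : m < pvZ t (i - l) := by omega
  have hm2 : m < r - i := by omega
  have h1 := pvLcp_match t (t.drop (i - l)) m hm1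
  rw [List.getElem?_drop] at h1
  have hkm : (i - l) + m < pvZ t l := by omega
  have h2 := pvLcp_match t (t.drop l) ((i - l) + m) hkm
  rw [List.getElem?_drop] at h2
  have hidx : l + ((i - l) + m) = i + m := by omega
  rw [hidx] at h2
  rw [List.getElem?_drop]
  exact ⟨h1.1.trans h2.1, h1.2⟩

-- the full fold invariant for B's loop
def pvInv (t : List Char) (m : Nat) (st : List Nat × Nat × Nat) : Prop :=
  st.1 = 0 :: (List.range' 1 m).map (pvZ t) ∧ st.2.2 ≤ t.length ∧
  (0 < st.2.2 → 1 ≤ st.2.1 ∧ st.2.1 ≤ m ∧ st.2.2 = st.2.1 + pvZ t st.2.1)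

theorem pvAcc_getD (t : List Char) (m j : Nat) (h1 : 1 ≤ j) (h2 : j ≤ m) :
    (0 :: (List.range' 1 m).map (pvZ t)).getD j 0 = pvZ t j := by
  rw [List.getD_eq_getElem?_getD]
  cases j with
  | zero => omega
  | succ j' =>
    have hlen : j' < ((List.range' 1 m).map (pvZ t)).length := by
      simp; omega
    rw [List.getElem?_cons_succ, List.getElem?_eq_getElem hlen]
    simp only [List.getElem_map, List.getElem_range']
    simp [Nat.add_comm]

theorem pvStepB_inv (t : List Char) (m : Nat) (st : List Nat × Nat × Nat)
    (hm : m + 1 ≤ t.length - 1) (hinv : pvInv t m st) :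
    pvInv t (m + 1) (pvStepB t st (m + 1)) := by
  obtain ⟨hacc, hrn, hwin⟩ := hinv
  set i := m + 1 with hi
  have hi1 : 1 ≤ i := by omega
  have z0_le : (if i < st.2.2 then min (st.2.2 - i) (st.1.getD (i - st.2.1) 0) else 0) ≤ pvZ t i := by
    split_ifs with hir
    · obtain ⟨hl1, hlm, hreq⟩ := hwin (by omega)
      have hgetD : st.1.getD (i - st.2.1) 0 = pvZ t (i - st.2.1) := by
        rw [hacc]; exact pvAcc_getD t m (i - st.2.1) (by omega) (by omega)
      rw [hgetD]
      exact pvWindow_lb t st.2.1 i st.2.2 hl1 (by omega) hir hreq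
    · omega
  have hzi : pvCountB t i (if i < st.2.2 then min (st.2.2 - i) (st.1.getD (i - st.2.1) 0) else 0)
      = pvZ t i := by
    rw [pvCountB_eq_pvCountA]
    exact pvCountA_eq t i _ hi1 z0_le
  have hzn : pvZ t i ≤ t.length - i := by
    have := pvLcp_le_right t (t.drop i)
    simpa [pvZ] using this
  have h1m : 1 + 1 * m = i := by omega
  have haccn : st.1 ++ [pvZ t i] = 0 :: (List.range' 1 (m + 1)).map (pvZ t) := by
    rw [hacc, List.range'_concat, h1m]
    simp
  unfold pvStepB pvInv
  simp only
  rw [hzi]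
  split_ifs with hrw <;> dsimp only
  · refine ⟨haccn, by omega, fun _ => ⟨hi1, by omega, rfl⟩⟩
  · exact ⟨haccn, hrn, fun h0 => ⟨(hwin h0).1, by omega, (hwin h0).2.2⟩⟩

theorem pvFoldB_inv (t : List Char) (m : Nat) (hm : m ≤ t.length - 1) :
    pvInv t m ((List.range' 1 m).foldl (pvStepB t) ([0], 0, 0)) := by
  induction m with
  | zero =>
    simp only [List.range'_zero, List.foldl_nil]
    exact ⟨by simp, by dsimp only; omega, by dsimp only; omega⟩
  | succ m' ih =>
    rw [List.range'_concat, List.foldl_append]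
    simp only [List.foldl_cons, List.foldl_nil, Nat.one_mul, Nat.add_comm 1 m']
    exact pvStepB_inv t m' _ hm (ih (by omega))

-- ===== VERDICT (by name: the statement is the Claim_ definition above) =====
theorem naive_z_function_spec : Claim_equal_naive_z_function := by
  intro s _
  unfold Spec_naive_z_function naive_z_function naive_z_function_alt
  set t := s.toList with ht
  simp only
  split_ifs with hn
  · rfl
  · have hinv := pvFoldB_inv t (t.length - 1) (le_refl _)
    rw [hinv.1]
    simp only [List.map_cons, Int.ofNat_eq_natCast, List.map_map]
    congr 1
    apply List.map_congr_left
    intro i hi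
    have hi1 : 1 ≤ i := (List.mem_range'_1.mp hi).1
    simp [Function.comp, pvCountA_eq t i 0 hi1 (by omega)]
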